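-- pv_equiv track=rewrite | github.com/kylehench/Python-Public | algo-practice/056_palindrome_index.py | palindromeIndex1
-- ===== SOURCE A (Python) =====
-- def palindromeIndex1(s):
--   # incomplete
--   if s==s[::-1]:
--     return -1
--   length = len(s)
--   for i in range(length):
--     test = s[0:i] + s[i+1:length]
--     if test==test[::-1]:
--       return i
--   return -1
-- ===== SOURCE B (Python) =====
-- def _is_pal_range(s, a, b):
--     # s[a..b] inclusive is a palindrome?
--     while a < b:
--         if s[a] != s[b]:
--             return False
--         a += 1
--         b -= 1
--     return True
--
--
-- def palindromeIndex1(s):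
--     # Two-pointer: find the first mismatched pair (l, r); only l, r, or an
--     # index in the equal-character run ending at l can fix the string.
--     l, r = 0, len(s) - 1
--     while l < r and s[l] == s[r]:
--         l += 1
--         r -= 1
--     if l >= r:
--         return -1
--     if _is_pal_range(s, l + 1, r):
--         # deleting l works; the smallest working index is the start of the
--         # run of characters equal to s[l] ending at position l
--         i = l
--         while i > 0 and s[i - 1] == s[l]:
--             i -= 1
--         return i
--     if _is_pal_range(s, l, r - 1):
--         return r
--     return -1
-- ===== Notes on version B (the rewrite author's own statement) =====
-- stated objective: faster
-- what changed: Replaced A's O(n^2) scan that rebuilds and reverses a candidate string for every index with a two-pointer scan to the first mismatched pair plus two O(n) palindrome-range checks and a backward run scan for the smallest working index.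
import Mathlib
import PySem

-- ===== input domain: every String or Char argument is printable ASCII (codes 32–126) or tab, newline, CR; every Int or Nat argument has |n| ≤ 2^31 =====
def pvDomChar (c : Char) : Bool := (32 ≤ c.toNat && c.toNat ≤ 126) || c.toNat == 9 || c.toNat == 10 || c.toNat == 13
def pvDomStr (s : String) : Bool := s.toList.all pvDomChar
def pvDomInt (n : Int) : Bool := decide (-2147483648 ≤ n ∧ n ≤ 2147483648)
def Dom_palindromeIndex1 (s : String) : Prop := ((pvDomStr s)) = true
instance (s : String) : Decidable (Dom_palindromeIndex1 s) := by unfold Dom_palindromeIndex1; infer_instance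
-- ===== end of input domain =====

-- B replaces A's quadratic delete-and-reverse scan with a linear two-pointer scan to the
-- first mismatched pair, two range palindrome checks, and a backward run scan.

-- ===== PORT A =====
-- s[::-1] (step -1 is never 0, so slice? is never none)
def pvARev (cs : List Char) : List Char :=
  (PySem.List.slice? cs none none (-1)).getD []

-- the 'for i in range(length)' loop: returns the first i with s[0:i]+s[i+1:length] a palindrome
def pvALoop (cs : List Char) (i : Nat) : Int :=
  if _h : i < cs.length then
    let test := PySem.List.slice cs (some 0) (some (i : Int)) ++
                PySem.List.slice cs (some ((i : Int) + 1)) (some (cs.length : Int))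
    if test = pvARev test then (i : Int) else pvALoop cs (i + 1)
  else -1
termination_by cs.length - i

def palindromeIndex1 (s : String) : Int :=
  let cs := s.toList
  if cs = pvARev cs then -1 else pvALoop cs 0

-- ===== PORT B =====
-- _is_pal_range: s[a..b] inclusive is a palindrome (indices are in range at every call
-- site, so the total getD is exact for Python's s[i] there)
def pvIsPalRange (cs : List Char) (a b : Nat) : Bool :=
  if a < b then
    if cs.getD a ' ' ≠ cs.getD b ' ' then false
    else pvIsPalRange cs (a + 1) (b - 1)
  else true
termination_by b - a

-- the 'while l < r and s[l] == s[r]' two-pointer scan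
def pvScan (cs : List Char) (l r : Nat) : Nat × Nat :=
  if l < r ∧ cs.getD l ' ' = cs.getD r ' ' then pvScan cs (l + 1) (r - 1) else (l, r)
termination_by r - l

-- the 'while i > 0 and s[i-1] == s[l]' backward run scan
def pvRunStart (cs : List Char) (i : Nat) (c : Char) : Nat :=
  if 0 < i ∧ cs.getD (i - 1) ' ' = c then pvRunStart cs (i - 1) c else i
termination_by i

def palindromeIndex1_alt (s : String) : Int :=
  let cs := s.toList
  let p := pvScan cs 0 (cs.length - 1)
  if p.1 ≥ p.2 then -1
  else if pvIsPalRange cs (p.1 + 1) p.2 then (pvRunStart cs p.1 (cs.getD p.1 ' ') : Int)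
  else if pvIsPalRange cs p.1 (p.2 - 1) then (p.2 : Int)
  else -1

-- ===== PRECONDITION & SPEC =====
def Spec_palindromeIndex1 (s : String) (out : Int) : Prop := out = palindromeIndex1_alt s
instance (s : String) (out : Int) : Decidable (Spec_palindromeIndex1 s out) := by unfold Spec_palindromeIndex1; infer_instance

-- ===== CLAIM (what is proved, stated in full; the proofs are below) =====
def Claim_equal_palindromeIndex1 : Prop := ∀ (s : String), Dom_palindromeIndex1 s → Spec_palindromeIndex1 s (palindromeIndex1 s)

-- ===== LEMMAS AND PROOFS =====

-- proof-only abbreviations: s[j] (total), the string with index i deleted, 'is a palindrome'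
def pvGd (cs : List Char) (j : Nat) : Char := cs.getD j ' '
def pvDel (cs : List Char) (i : Nat) : List Char := cs.take i ++ cs.drop (i + 1)
def pvPal (cs : List Char) : Prop := cs = cs.reverse

theorem pvADel_eq (cs : List Char) (i : Nat) :
    PySem.List.slice cs (some 0) (some (i : Int)) ++
      PySem.List.slice cs (some ((i : Int) + 1)) (some (cs.length : Int)) = pvDel cs i := by
  have h1 : ((i : Int) + 1) = ((i + 1 : Nat) : Int) := by push_cast; ring
  rw [h1, PySem.List.slice_natCast, PySem.List.slice_zero_start, PySem.List.slice_to_natCast]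
  unfold pvDel
  congr 1
  exact List.take_of_length_le (by simp)

theorem pvDel_getD (cs : List Char) (i j : Nat) (hi : i < cs.length) (hj : j < cs.length - 1) :
    pvGd (pvDel cs i) j = if j < i then pvGd cs j else pvGd cs (j + 1) := by
  unfold pvGd pvDel
  have hti : (cs.take i).length = i := by simp; omega
  by_cases h : j < i
  · rw [if_pos h]
    rw [List.getD_eq_getElem?_getD, List.getElem?_append_left (by omega),
      List.getElem?_take_of_lt h, ← List.getD_eq_getElem?_getD]
  · rw [if_neg h]
    rw [List.getD_eq_getElem?_getD, List.getElem?_append_right (by omega),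
      List.getElem?_drop, hti, ← List.getD_eq_getElem?_getD]
    congr 1
    omega

theorem pvPal_iff (cs : List Char) :
    pvPal cs ↔ ∀ j, j < cs.length → pvGd cs j = pvGd cs (cs.length - 1 - j) := by
  unfold pvPal pvGd
  constructor
  · intro h j hj
    conv_lhs => rw [h]
    rw [List.getD_eq_getElem?_getD, List.getElem?_reverse hj, ← List.getD_eq_getElem?_getD]
  · intro h
    apply List.ext_getElem (by simp)
    intro j h1 h2
    have hj2 : cs.length - 1 - j < cs.length := by omega
    rw [List.getElem_reverse]
    simpa [List.getD_eq_getElem?_getD, List.getElem?_eq_getElem h1,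
      List.getElem?_eq_getElem hj2] using h j h1

theorem pvPal_reverse (cs : List Char) : pvPal cs.reverse ↔ pvPal cs := by
  unfold pvPal
  constructor
  · intro h
    conv_lhs => rw [← List.reverse_reverse cs, h]
    simp
  · intro h
    rw [List.reverse_reverse]
    exact h.symm

theorem pvGd_reverse (cs : List Char) (j : Nat) (hj : j < cs.length) :
    pvGd cs.reverse j = pvGd cs (cs.length - 1 - j) := by
  unfold pvGd
  rw [List.getD_eq_getElem?_getD, List.getElem?_reverse hj, ← List.getD_eq_getElem?_getD]

theorem pvDel_reverse (cs : List Char) (j : Nat) (hj : j < cs.length) :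
    (pvDel cs j).reverse = pvDel cs.reverse (cs.length - 1 - j) := by
  unfold pvDel
  rw [List.reverse_append, List.reverse_take, List.reverse_drop]
  have e1 : cs.length - (j + 1) = cs.length - 1 - j := by omega
  have e2 : cs.length - j = cs.length - 1 - j + 1 := by omega
  rw [e1, e2]

theorem pvDel_eq_succ (cs : List Char) (i : Nat) (h : i + 1 < cs.length)
    (he : pvGd cs i = pvGd cs (i + 1)) : pvDel cs i = pvDel cs (i + 1) := by
  have hi : i < cs.length := by omega
  have he' : cs[i] = cs[i + 1] := by
    simpa [pvGd, List.getD_eq_getElem?_getD, List.getElem?_eq_getElem hi,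
      List.getElem?_eq_getElem h] using he
  unfold pvDel
  rw [List.take_add_one, List.drop_eq_getElem_cons h, List.getElem?_eq_getElem hi]
  simp [he']

theorem pvARev_eq (cs : List Char) : pvARev cs = cs.reverse := by
  simp [pvARev, PySem.List.slice?_none_none_neg_one]

theorem pvALoop_step (cs : List Char) (i : Nat) (h : i < cs.length) :
    pvALoop cs i = if pvDel cs i = (pvDel cs i).reverse then (i : Int) else pvALoop cs (i + 1) := by
  rw [pvALoop]
  rw [dif_pos h]
  simp only [pvARev_eq, pvADel_eq]

theorem pvALoop_stop (cs : List Char) (i : Nat) (h : ¬ i < cs.length) :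
    pvALoop cs i = -1 := by
  rw [pvALoop, dif_neg h]

theorem pvALoop_eq_of_first (cs : List Char) (k : Nat) (hk : k < cs.length)
    (hpal : pvPal (pvDel cs k))
    (hmin : ∀ j, j < k → ¬ pvPal (pvDel cs j)) :
    ∀ i, i ≤ k → pvALoop cs i = (k : Int) := by
  intro i hik
  induction hn : k - i generalizing i with
  | zero =>
    have : i = k := by omega
    subst this
    rw [pvALoop_step cs i hk, if_pos (show pvDel cs i = (pvDel cs i).reverse from hpal)]
  | succ m ih =>
    rw [pvALoop_step cs i (by omega), if_neg (show ¬ pvDel cs i = (pvDel cs i).reverse from hmin i (by omega))]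
    exact ih (i + 1) (by omega) (by omega)

theorem pvALoop_eq_neg (cs : List Char) :
    ∀ i, (∀ j, i ≤ j → j < cs.length → ¬ pvPal (pvDel cs j)) → pvALoop cs i = -1 := by
  intro i
  induction hn : cs.length - i generalizing i with
  | zero => intro _; exact pvALoop_stop cs i (by omega)
  | succ m ih =>
    intro h
    rw [pvALoop_step cs i (by omega), if_neg (show ¬ pvDel cs i = (pvDel cs i).reverse from h i (by omega) (by omega))]
    exact ih (i + 1) (by omega) (fun j h1 h2 => h j (by omega) h2)

theorem pvScan_out_aux (cs : List Char) :
    ∀ n l r, r - l ≤ n →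
    l ≤ (pvScan cs l r).1 ∧ (pvScan cs l r).1 + (pvScan cs l r).2 = l + r ∧
    (∀ j, l ≤ j → j < (pvScan cs l r).1 → pvGd cs j = pvGd cs (l + r - j)) ∧
    ((pvScan cs l r).1 ≥ (pvScan cs l r).2 ∨
      ((pvScan cs l r).1 < (pvScan cs l r).2 ∧
        pvGd cs (pvScan cs l r).1 ≠ pvGd cs (pvScan cs l r).2)) := by
  intro n
  induction n with
  | zero =>
    intro l r hn
    rw [pvScan, if_neg (fun h => absurd h.1 (by omega))]
    exact ⟨le_refl _, rfl, fun j h1 h2 => absurd h2 (by omega), Or.inl (by omega)⟩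
  | succ m ih =>
    intro l r hn
    by_cases hg : l < r ∧ cs.getD l ' ' = cs.getD r ' '
    · have hlr : l < r := hg.1
      rw [pvScan, if_pos hg]
      have heq : l + 1 + (r - 1) = l + r := by omega
      obtain ⟨i1, i2, i3, i4⟩ := ih (l + 1) (r - 1) (by omega)
      rw [heq] at i2 i3
      refine ⟨by omega, i2, ?_, i4⟩
      intro j h1 h2
      by_cases hj : j = l
      · rw [hj, show l + r - l = r from by omega]
        exact hg.2
      · exact i3 j (by omega) h2
    · rw [pvScan, if_neg hg]
      refine ⟨le_refl _, rfl, fun j h1 h2 => absurd h2 (by omega), ?_⟩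
      by_cases hlt : l < r
      · exact Or.inr ⟨hlt, fun he => hg ⟨hlt, he⟩⟩
      · exact Or.inl (by omega)

theorem pvScan_out (cs : List Char) (l r : Nat) :
    l ≤ (pvScan cs l r).1 ∧ (pvScan cs l r).1 + (pvScan cs l r).2 = l + r ∧
    (∀ j, l ≤ j → j < (pvScan cs l r).1 → pvGd cs j = pvGd cs (l + r - j)) ∧
    ((pvScan cs l r).1 ≥ (pvScan cs l r).2 ∨
      ((pvScan cs l r).1 < (pvScan cs l r).2 ∧
        pvGd cs (pvScan cs l r).1 ≠ pvGd cs (pvScan cs l r).2)) :=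
  pvScan_out_aux cs (r - l) l r (le_refl _)

theorem pvIsPalRange_iff_aux (cs : List Char) :
    ∀ n a b, b - a ≤ n →
    (pvIsPalRange cs a b = true ↔ ∀ k, a ≤ k → k ≤ b → pvGd cs k = pvGd cs (a + b - k)) := by
  intro n
  induction n with
  | zero =>
    intro a b hn
    rw [pvIsPalRange, if_neg (by omega)]
    simp only [true_iff]
    intro k h1 h2
    have hab : k = a ∧ a = b ∨ b < a := by omega
    rcases hab with ⟨rfl, rfl⟩ | h
    · unfold pvGd; congr 1; omega
    · omega
  | succ m ih =>
    intro a b hn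
    by_cases hab : a < b
    · rw [pvIsPalRange, if_pos hab]
      by_cases he : cs.getD a ' ' = cs.getD b ' '
      · rw [if_neg (by simpa using he)]
        rw [ih (a + 1) (b - 1) (by omega)]
        constructor
        · intro h k h1 h2
          by_cases hk : k = a
          · rw [hk, show a + b - a = b from by omega]
            exact he
          · by_cases hk2 : k = b
            · rw [hk2, show a + b - b = a from by omega]
              exact he.symm
            · have hh := h k (by omega) (by omega)
              have e : a + 1 + (b - 1) = a + b := by omega
              rwa [e] at hh
        · intro h k h1 h2
          have hh := h k (by omega) (by omega)
          have e : a + 1 + (b - 1) = a + b := by omega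
          rwa [e]
      · rw [if_pos (by simpa using he)]
        simp only [Bool.false_eq_true, false_iff]
        intro h
        have hh := h a (le_refl _) (by omega)
        rw [show a + b - a = b by omega] at hh
        exact he hh
    · rw [pvIsPalRange, if_neg hab]
      simp only [true_iff]
      intro k h1 h2
      have : k = a ∧ a = b := by omega
      obtain ⟨rfl, rfl⟩ := this
      unfold pvGd; congr 1; omega

theorem pvIsPalRange_iff (cs : List Char) (a b : Nat) :
    pvIsPalRange cs a b = true ↔ ∀ k, a ≤ k → k ≤ b → pvGd cs k = pvGd cs (a + b - k) :=
  pvIsPalRange_iff_aux cs (b - a) a b (le_refl _)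

theorem pvRunStart_le (cs : List Char) (c : Char) : ∀ i, pvRunStart cs i c ≤ i := by
  intro i
  induction i with
  | zero => rw [pvRunStart]; rw [if_neg (by omega)]
  | succ m ih =>
    rw [pvRunStart]
    by_cases hg : 0 < m + 1 ∧ cs.getD (m + 1 - 1) ' ' = c
    · rw [if_pos hg]
      simp only [Nat.add_sub_cancel]
      omega
    · rw [if_neg hg]

theorem pvRunStart_run (cs : List Char) (c : Char) :
    ∀ i k, pvRunStart cs i c ≤ k → k < i → pvGd cs k = c := by
  intro i
  induction i with
  | zero => intro k _ h2; omega
  | succ m ih =>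
    intro k h1 h2
    rw [pvRunStart] at h1
    by_cases hg : 0 < m + 1 ∧ cs.getD (m + 1 - 1) ' ' = c
    · rw [if_pos hg] at h1
      simp only [Nat.add_sub_cancel] at h1
      by_cases hk : k = m
      · subst hk
        simpa [pvGd] using hg.2
      · exact ih k h1 (by omega)
    · rw [if_neg hg] at h1; omega

theorem pvRunStart_min (cs : List Char) (c : Char) :
    ∀ i, pvRunStart cs i c = 0 ∨ pvGd cs (pvRunStart cs i c - 1) ≠ c := by
  intro i
  induction i with
  | zero => rw [pvRunStart, if_neg (by omega)]; left; rfl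
  | succ m ih =>
    rw [pvRunStart]
    by_cases hg : 0 < m + 1 ∧ cs.getD (m + 1 - 1) ' ' = c
    · rw [if_pos hg]
      simpa only [Nat.add_sub_cancel] using ih
    · rw [if_neg hg]
      right
      intro he
      exact hg ⟨by omega, by simpa [pvGd] using he⟩

theorem pvDel_eq_of_run (cs : List Char) :
    ∀ m i l, l - i ≤ m → i ≤ l → l < cs.length →
    (∀ k, i ≤ k → k < l → pvGd cs k = pvGd cs (k + 1)) → pvDel cs i = pvDel cs l := by
  intro m
  induction m with
  | zero =>
    intro i l h1 h2 _ _
    have : i = l := by omega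
    rw [this]
  | succ m ih =>
    intro i l h1 h2 hl run
    by_cases hil : i = l
    · rw [hil]
    · have hstep : pvDel cs i = pvDel cs (i + 1) :=
        pvDel_eq_succ cs i (by omega) (run i (le_refl _) (by omega))
      rw [hstep]
      exact ih (i + 1) l (by omega) (by omega) hl (fun k hk1 hk2 => run k (by omega) hk2)

theorem pvDel_length (cs : List Char) (i : Nat) (hi : i < cs.length) :
    (pvDel cs i).length = cs.length - 1 := by
  simp [pvDel]; omega

theorem pvPalDel_iff (cs : List Char) (i : Nat) (hi : i < cs.length) :
    pvPal (pvDel cs i) ↔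
      ∀ j, j < cs.length - 1 →
        (if j < i then pvGd cs j else pvGd cs (j + 1)) =
        (if cs.length - 2 - j < i then pvGd cs (cs.length - 2 - j)
         else pvGd cs (cs.length - 2 - j + 1)) := by
  rw [pvPal_iff]
  rw [pvDel_length cs i hi]
  constructor
  · intro h j hj
    have hj2 : cs.length - 1 - 1 - j < cs.length - 1 := by omega
    have := h j hj
    rw [pvDel_getD cs i j hi hj, pvDel_getD cs i _ hi hj2] at this
    rw [show cs.length - 1 - 1 - j = cs.length - 2 - j from by omega] at this
    exact this
  · intro h j hj
    have hj2 : cs.length - 1 - 1 - j < cs.length - 1 := by omega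
    rw [pvDel_getD cs i j hi hj, pvDel_getD cs i _ hi hj2]
    rw [show cs.length - 1 - 1 - j = cs.length - 2 - j from by omega]
    exact h j hj

theorem pvC1 (cs : List Char) (l r i : Nat) (hlr : l + r = cs.length - 1) (hlt : l < r)
    (hrn : r < cs.length) (hne : pvGd cs l ≠ pvGd cs r) (h1 : l < i) (h2 : i < r) :
    ¬ pvPal (pvDel cs i) := by
  intro h
  rw [pvPalDel_iff cs i (by omega)] at h
  have := h l (by omega)
  rw [if_pos (by omega), if_neg (by omega)] at this
  rw [show cs.length - 2 - l + 1 = r from by omega] at this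
  exact hne this

theorem pvC2 (cs : List Char) (l r : Nat) (hlr : l + r = cs.length - 1) (hlt : l < r)
    (hrn : r < cs.length) (hpre : ∀ j, j < l → pvGd cs j = pvGd cs (cs.length - 1 - j)) :
    pvPal (pvDel cs l) ↔ ∀ k, l + 1 ≤ k → k ≤ r → pvGd cs k = pvGd cs (l + 1 + r - k) := by
  rw [pvPalDel_iff cs l (by omega)]
  constructor
  · intro h k hk1 hk2
    have hh := h (k - 1) (by omega)
    rw [if_neg (by omega), if_neg (by omega)] at hh
    rw [show k - 1 + 1 = k from by omega,
      show cs.length - 2 - (k - 1) + 1 = l + 1 + r - k from by omega] at hh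
    exact hh
  · intro h j hj
    by_cases c1 : j < l
    · rw [if_pos c1, if_neg (by omega)]
      rw [show cs.length - 2 - j + 1 = cs.length - 1 - j from by omega]
      exact hpre j c1
    · by_cases c2 : j ≤ r - 1
      · rw [if_neg c1, if_neg (by omega)]
        have hh := h (j + 1) (by omega) (by omega)
        rw [show l + 1 + r - (j + 1) = cs.length - 2 - j + 1 from by omega] at hh
        exact hh
      · have hl1 : 1 ≤ l := by omega
        rw [if_neg c1, if_pos (by omega)]
        have hh := hpre (cs.length - 2 - j) (by omega)
        rw [show cs.length - 1 - (cs.length - 2 - j) = j + 1 from by omega] at hh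
        exact hh.symm

theorem pvC3 (cs : List Char) (l r : Nat) (hlr : l + r = cs.length - 1) (hlt : l < r)
    (hrn : r < cs.length) (hpre : ∀ j, j < l → pvGd cs j = pvGd cs (cs.length - 1 - j)) :
    pvPal (pvDel cs r) ↔ ∀ k, l ≤ k → k ≤ r - 1 → pvGd cs k = pvGd cs (l + (r - 1) - k) := by
  rw [pvPalDel_iff cs r (by omega)]
  constructor
  · intro h k hk1 hk2
    have hh := h k (by omega)
    rw [if_pos (by omega), if_pos (by omega)] at hh
    rw [show cs.length - 2 - k = l + (r - 1) - k from by omega] at hh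
    exact hh
  · intro h j hj
    by_cases c1 : j < l
    · rw [if_pos (by omega), if_neg (by omega)]
      rw [show cs.length - 2 - j + 1 = cs.length - 1 - j from by omega]
      exact hpre j c1
    · by_cases c2 : j ≤ r - 1
      · rw [if_pos (by omega), if_pos (by omega)]
        have hh := h j (by omega) c2
        rw [show l + (r - 1) - j = cs.length - 2 - j from by omega] at hh
        exact hh
      · have hl1 : 1 ≤ l := by omega
        rw [if_neg (by omega), if_pos (by omega)]
        have hh := hpre (cs.length - 2 - j) (by omega)
        rw [show cs.length - 1 - (cs.length - 2 - j) = j + 1 from by omega] at hh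
        exact hh.symm

theorem pvC4 (cs : List Char) (l r i : Nat) (hlr : l + r = cs.length - 1) (hlt : l < r)
    (hrn : r < cs.length) (hpre : ∀ j, j < l → pvGd cs j = pvGd cs (cs.length - 1 - j))
    (hil : i < l) :
    pvPal (pvDel cs i) ↔
      (∀ k, i ≤ k → k < l → pvGd cs k = pvGd cs (k + 1)) ∧ pvPal (pvDel cs l) := by
  constructor
  · intro h
    have run : ∀ k, i ≤ k → k < l → pvGd cs k = pvGd cs (k + 1) := by
      intro k hk1 hk2
      rw [pvPalDel_iff cs i (by omega)] at h
      have hh := h k (by omega)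
      rw [if_neg (by omega), if_neg (by omega)] at hh
      rw [show cs.length - 2 - k + 1 = cs.length - 1 - k from by omega] at hh
      have hp := hpre k hk2
      rw [← hh] at hp
      exact hp
    have hdel : pvDel cs i = pvDel cs l :=
      pvDel_eq_of_run cs (l - i) i l (le_refl _) (by omega) (by omega) run
    rw [hdel] at h
    exact ⟨run, h⟩
  · intro ⟨run, hl⟩
    have hdel : pvDel cs i = pvDel cs l :=
      pvDel_eq_of_run cs (l - i) i l (le_refl _) (by omega) (by omega) run
    rw [hdel]
    exact hl


theorem pvC5 (cs : List Char) (l r j : Nat) (hlr : l + r = cs.length - 1) (hlt : l < r)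
    (hrn : r < cs.length) (hpre : ∀ j', j' < l → pvGd cs j' = pvGd cs (cs.length - 1 - j'))
    (hj : r < j) (hjn : j < cs.length) :
    pvPal (pvDel cs j) → pvPal (pvDel cs r) := by
  intro h
  have hrevlen : cs.reverse.length = cs.length := List.length_reverse
  have hpreR : ∀ k, k < l → pvGd cs.reverse k = pvGd cs.reverse (cs.reverse.length - 1 - k) := by
    intro k hk
    rw [hrevlen, pvGd_reverse cs k (by omega), pvGd_reverse cs _ (by omega)]
    rw [show cs.length - 1 - (cs.length - 1 - k) = k from by omega]
    exact (hpre k hk).symm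
  have hrev : pvPal (pvDel cs.reverse (cs.length - 1 - j)) := by
    rw [← pvDel_reverse cs j hjn]
    exact (pvPal_reverse (pvDel cs j)).mpr h
  have hi' : cs.length - 1 - j < l := by omega
  have hC4 := pvC4 cs.reverse l r (cs.length - 1 - j)
    (by rw [hrevlen]; exact hlr) hlt (by rw [hrevlen]; exact hrn) hpreR hi'
  have hpalL : pvPal (pvDel cs.reverse l) := (hC4.mp hrev).2
  have hdr : pvDel cs.reverse l = (pvDel cs r).reverse := by
    rw [pvDel_reverse cs r (by omega)]
    congr 1
    omega
  rw [hdr] at hpalL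
  exact (pvPal_reverse (pvDel cs r)).mp hpalL

theorem pv_main (s : String) : palindromeIndex1 s = palindromeIndex1_alt s := by
  unfold palindromeIndex1 palindromeIndex1_alt
  simp only [pvARev_eq]
  set cs := s.toList with hcs
  set n := cs.length with hn
  obtain ⟨hs1, hs2, hs3, hs4⟩ := pvScan_out cs 0 (n - 1)
  set L := (pvScan cs 0 (n - 1)).1 with hL
  set R := (pvScan cs 0 (n - 1)).2 with hR
  simp only [Nat.zero_add] at hs2 hs3
  by_cases hpal : cs = cs.reverse
  · rw [if_pos hpal]
    rcases hs4 with hge | ⟨hlt, hne⟩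
    · rw [if_pos hge]
    · exfalso
      have hLn : L < n := by omega
      have := (pvPal_iff cs).mp hpal L hLn
      rw [show n - 1 - L = R from by omega] at this
      exact hne this
  · rw [if_neg hpal]
    rcases hs4 with hge | ⟨hlt, hne⟩
    · exfalso
      apply hpal
      apply (pvPal_iff cs).mpr
      intro j hj
      by_cases hjL : j < L
      · have := hs3 j (Nat.zero_le _) hjL
        rwa [show n - 1 - j = n - 1 - j from rfl] at this
      · by_cases hjm : n - 1 - j < L
        · have := hs3 (n - 1 - j) (Nat.zero_le _) hjm
          rw [show n - 1 - (n - 1 - j) = j from by omega] at this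
          exact this.symm
        · rw [show n - 1 - j = j from by omega]
    · rw [if_neg (by omega)]
      have hlr : L + R = n - 1 := hs2
      have hRn : R < n := by omega
      have hpre : ∀ j, j < L → pvGd cs j = pvGd cs (n - 1 - j) := by
        intro j hjl
        exact hs3 j (Nat.zero_le _) hjl
      by_cases hbL : pvIsPalRange cs (L + 1) R = true
      · rw [if_pos hbL]
        have hpalL : pvPal (pvDel cs L) :=
          (pvC2 cs L R hlr hlt hRn hpre).mpr ((pvIsPalRange_iff cs (L + 1) R).mp hbL)
        set c := cs.getD L ' ' with hc
        set i0 := pvRunStart cs L c with hi0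
        have hle : i0 ≤ L := pvRunStart_le cs c L
        have hrun : ∀ k, i0 ≤ k → k < L → pvGd cs k = c := pvRunStart_run cs c L
        have hcL : pvGd cs L = c := rfl
        have hgd : ∀ k, i0 ≤ k → k ≤ L → pvGd cs k = c := by
          intro k h1 h2
          by_cases hk : k = L
          · rw [hk]; exact hcL
          · exact hrun k h1 (by omega)
        have hpal0 : pvPal (pvDel cs i0) := by
          by_cases h0 : i0 = L
          · rw [h0]; exact hpalL
          · apply (pvC4 cs L R i0 hlr hlt hRn hpre (by omega)).mpr
            refine ⟨?_, hpalL⟩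
            intro k h1 h2
            rw [hgd k h1 (by omega), hgd (k + 1) (by omega) (by omega)]
        have hmin0 : ∀ j, j < i0 → ¬ pvPal (pvDel cs j) := by
          intro j hji0 hp
          have hjL : j < L := by omega
          have run := ((pvC4 cs L R j hlr hlt hRn hpre hjL).mp hp).1
          have h1 : pvGd cs (i0 - 1) = pvGd cs i0 := by
            have hr := run (i0 - 1) (by omega) (by omega)
            rwa [show i0 - 1 + 1 = i0 from by omega] at hr
          have h2 : pvGd cs i0 = c := hgd i0 (le_refl _) hle
          rcases pvRunStart_min cs c L with h | h
          · omega
          · exact h (by rw [← hi0] at *; rw [h1, h2])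
        exact pvALoop_eq_of_first cs i0 (by omega) hpal0 hmin0 0 (Nat.zero_le _)
      · rw [if_neg hbL]
        have hnotL : ¬ pvPal (pvDel cs L) := by
          intro hp
          exact hbL ((pvIsPalRange_iff cs (L + 1) R).mpr
            ((pvC2 cs L R hlr hlt hRn hpre).mp hp))
        by_cases hbR : pvIsPalRange cs L (R - 1) = true
        · rw [if_pos hbR]
          have hpalR : pvPal (pvDel cs R) :=
            (pvC3 cs L R hlr hlt hRn hpre).mpr ((pvIsPalRange_iff cs L (R - 1)).mp hbR)
          have hminR : ∀ j, j < R → ¬ pvPal (pvDel cs j) := by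
            intro j hjR hp
            by_cases hjL : j < L
            · exact hnotL ((pvC4 cs L R j hlr hlt hRn hpre hjL).mp hp).2
            · by_cases hjeq : j = L
              · rw [hjeq] at hp; exact hnotL hp
              · exact pvC1 cs L R j hlr hlt hRn hne (by omega) hjR hp
          exact pvALoop_eq_of_first cs R hRn hpalR hminR 0 (Nat.zero_le _)
        · rw [if_neg hbR]
          have hnotR : ¬ pvPal (pvDel cs R) := by
            intro hp
            exact hbR ((pvIsPalRange_iff cs L (R - 1)).mpr
              ((pvC3 cs L R hlr hlt hRn hpre).mp hp))
          apply pvALoop_eq_neg cs 0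
          intro j _ hjn hp
          by_cases hjL : j < L
          · exact hnotL ((pvC4 cs L R j hlr hlt hRn hpre hjL).mp hp).2
          · by_cases hjeq : j = L
            · rw [hjeq] at hp; exact hnotL hp
            · by_cases hjR : j < R
              · exact pvC1 cs L R j hlr hlt hRn hne (by omega) hjR hp
              · by_cases hjeqR : j = R
                · rw [hjeqR] at hp; exact hnotR hp
                · exact hnotR (pvC5 cs L R j hlr hlt hRn hpre (by omega) hjn hp)

-- ===== VERDICT (by name: the statement is the Claim_ definition above) =====
theorem palindromeIndex1_spec : Claim_equal_palindromeIndex1 := by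
  intro s _
  exact pv_main s
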